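-- pv_equiv track=rewrite | github.com/chips-wq/everybody-codes | event2025/day10/part3.py | get_sheep_positions
-- ===== SOURCE A (Python) =====
-- def get_sheep_positions(board: list[list[str]]):
--     n, m = len(board), len(board[0])
--     sheep_positions = [-1] * m
--     for j in range(m):
--         for i in range(n):
--             if board[i][j] == 'S':
--                 sheep_positions[j] = i
--                 break
--     return tuple(sheep_positions)
-- ===== SOURCE B (Python) =====
-- def get_sheep_positions(board):
--     m = len(board[0])
--     sheep = [-1] * m
--     for i, row in enumerate(board):
--         sheep = [i if s == -1 and c == 'S' else s for s, c in zip(sheep, row)]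
--     return tuple(sheep)
-- ===== Notes on version B (the rewrite author's own statement) =====
-- stated objective: alternative
-- what changed: Replaces A's per-column inner scan with break by a single top-down row-major sweep that carries the result list and overwrites only still-unfound (-1) slots via zip.
-- outside the precondition, e.g. on get_sheep_positions([['S'], []]): A returns (0,), B returns ()
import Mathlib
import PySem

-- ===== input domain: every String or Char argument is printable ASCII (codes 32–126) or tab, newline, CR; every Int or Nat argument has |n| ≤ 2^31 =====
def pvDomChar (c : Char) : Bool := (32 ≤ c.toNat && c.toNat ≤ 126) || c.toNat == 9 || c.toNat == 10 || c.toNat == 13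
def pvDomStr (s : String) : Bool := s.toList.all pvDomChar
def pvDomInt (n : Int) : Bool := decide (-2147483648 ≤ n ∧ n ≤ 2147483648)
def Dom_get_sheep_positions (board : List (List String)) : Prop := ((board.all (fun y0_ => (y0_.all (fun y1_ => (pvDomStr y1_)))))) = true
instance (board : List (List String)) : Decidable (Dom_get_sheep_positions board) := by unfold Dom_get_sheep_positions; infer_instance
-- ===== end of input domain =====

-- B replaces A's per-column scan-with-break by one top-down row-major sweep carrying the
-- result list and overwriting only still-unfound (-1) slots; same cost, different organisation.


-- ===== PORT A =====
-- inner loop 'for i in range(n): if board[i][j] == "S": sheep_positions[j] = i; break'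
-- (out-of-range board[i][j] would be an IndexError in Python; pyGet? none is defaulted to "",
--  exact on Pre_, which keeps every index in range)
def pvA_col : List (List String) → Int → Int → Int
  | [], _, _ => -1
  | row :: rest, j, i =>
    if (PySem.List.pyGet? row j).getD "" == "S" then i else pvA_col rest j (i + 1)

def get_sheep_positions (board : List (List String)) : List Int :=
  let m : Int := ((board.headD []).length : Int)
  (PySem.List.pyRange 0 m 1).map (fun j => pvA_col board j 0)

-- ===== PORT B =====
def pvB_row (i : Int) (sheep : List Int) (row : List String) : List Int :=
  List.zipWith (fun s c => if s == -1 && c == "S" then i else s) sheep row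

def get_sheep_positions_alt (board : List (List String)) : List Int :=
  let m := (board.headD []).length
  (PySem.List.enumerate board 0).foldl (fun sheep p => pvB_row p.1 sheep p.2)
    (List.replicate m (-1))

-- ===== PRECONDITION & SPEC =====
-- Pre_ excludes the empty board (A raises IndexError on board[0]) and ragged boards with a row
-- shorter than the first row: there A either raises IndexError or returns only because a column's
-- early break happens to stop before the short row — an accident of the scan order that B's
-- zip-truncation does not reproduce.
def Pre_get_sheep_positions (board : List (List String)) : Prop :=
  board ≠ [] ∧ ∀ row ∈ board, (board.headD []).length ≤ row.length
instance (board : List (List String)) : Decidable (Pre_get_sheep_positions board) := by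
  unfold Pre_get_sheep_positions; infer_instance
def pvWitness_get_sheep_positions : List (List String) := [["S", "."], [".", "S"]]
def Spec_get_sheep_positions (board : List (List String)) (out : List Int) : Prop := out = get_sheep_positions_alt board
instance (board : List (List String)) (out : List Int) : Decidable (Spec_get_sheep_positions board out) := by unfold Spec_get_sheep_positions; infer_instance

-- ===== CLAIM (what is proved, stated in full; the proofs are below) =====
def Claim_equal_get_sheep_positions : Prop := ∀ (board : List (List String)), Dom_get_sheep_positions board → Pre_get_sheep_positions board → Spec_get_sheep_positions board (get_sheep_positions board)

-- ===== LEMMAS AND PROOFS =====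

theorem pvB_fold_length (rows : List (List String)) (i0 : Int) (sheep : List Int)
    (h : ∀ r ∈ rows, sheep.length ≤ r.length) :
    ((PySem.List.enumerate rows i0).foldl (fun s p => pvB_row p.1 s p.2) sheep).length
      = sheep.length := by
  induction rows generalizing i0 sheep with
  | nil => simp [PySem.List.enumerate_nil]
  | cons r rs ih =>
      have hr : sheep.length ≤ r.length := h r (List.mem_cons_self ..)
      have hlen : (pvB_row i0 sheep r).length = sheep.length := by
        simp [pvB_row]; omega
      have ih' := ih (i0 + 1) (pvB_row i0 sheep r)
        (by intro x hx; rw [hlen]; exact h x (List.mem_cons_of_mem _ hx))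
      rw [PySem.List.enumerate_cons, List.foldl_cons]
      simpa [hlen] using ih'

theorem pvB_fold_get (rows : List (List String)) (i0 : Int) (h0 : 0 ≤ i0)
    (sheep : List Int) (h : ∀ r ∈ rows, sheep.length ≤ r.length)
    (j : Nat) (hj : j < sheep.length) :
    ((PySem.List.enumerate rows i0).foldl (fun s p => pvB_row p.1 s p.2) sheep)[j]?
      = some (if sheep[j] = -1 then pvA_col rows (j : Int) i0 else sheep[j]) := by
  induction rows generalizing i0 sheep with
  | nil =>
      rw [PySem.List.enumerate_nil, List.foldl_nil, List.getElem?_eq_getElem hj]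
      by_cases hS : sheep[j] = -1 <;> simp [pvA_col, hS]
  | cons r rs ih =>
      have hr : sheep.length ≤ r.length := h r (List.mem_cons_self ..)
      have hjr : j < r.length := lt_of_lt_of_le hj hr
      have hget : PySem.List.pyGet? r (j : Int) = some r[j] := by
        rw [PySem.List.pyGet?_natCast, List.getElem?_eq_getElem hjr]
      have hlen : (pvB_row i0 sheep r).length = sheep.length := by
        simp [pvB_row]; omega
      have hval : (pvB_row i0 sheep r)[j]'(by omega)
          = if sheep[j] == -1 && r[j] == "S" then i0 else sheep[j] := by
        simp [pvB_row]
      have ih' := ih (i0 + 1) (by omega) (pvB_row i0 sheep r)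
        (by intro x hx; rw [hlen]; exact h x (List.mem_cons_of_mem _ hx)) (by omega)
      rw [PySem.List.enumerate_cons, List.foldl_cons]
      simp only [] at ih' ⊢
      rw [ih']
      simp only [hval, pvA_col, hget]
      by_cases hS : sheep[j] = -1
      · by_cases hRS : r[j] = "S"
        · simp [hS, hRS]; omega
        · simp [hS, hRS]
      · simp [hS, show (sheep[j] == (-1 : Int)) = false by simpa using hS]

-- ===== VERDICT (by name: the statement is the Claim_ definition above) =====
theorem get_sheep_positions_spec : Claim_equal_get_sheep_positions := by
  intro board _ hpre
  obtain ⟨hne, hrows⟩ := hpre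
  unfold Spec_get_sheep_positions get_sheep_positions get_sheep_positions_alt
  set m := (board.headD []).length with hm
  have hrep : ∀ r ∈ board, (List.replicate m (-1 : Int)).length ≤ r.length := by
    intro r hr; simpa using hrows r hr
  apply List.ext_getElem?
  intro j
  by_cases hj : j < m
  · have hA : ((PySem.List.pyRange 0 (m : Int) 1).map (fun j => pvA_col board j 0))[j]?
        = some (pvA_col board (j : Int) 0) := by
      rw [PySem.List.getElem?_map_pyRange_zero _ _ _ hj]
    have hB := pvB_fold_get board 0 le_rfl (List.replicate m (-1)) hrep j (by simpa using hj)
    rw [hA, hB]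
    simp [List.getElem_replicate]
  · have hA : ((PySem.List.pyRange 0 (m : Int) 1).map (fun j => pvA_col board j 0))[j]? = none := by
      rw [List.getElem?_eq_none]
      simp [PySem.List.length_pyRange_one]; omega
    have hB : ((PySem.List.enumerate board 0).foldl (fun s p => pvB_row p.1 s p.2)
        (List.replicate m (-1 : Int)))[j]? = none := by
      rw [List.getElem?_eq_none]
      rw [pvB_fold_length _ _ _ hrep]; simpa using not_lt.mp hj
    rw [hA, hB]
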